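-- pv_equiv track=rewrite | github.com/elBurg0/grizzly_py2sql | test_functions.py | udf3
-- ===== SOURCE A (Python) =====
-- def udf3(a: int) -> int:
--     i: int = 22
--     m: int = a + i
--     for i in range(1, a):
--         if i + a > 20:
--             return 20 * a
--         else:
--             return 0
--     return m
-- ===== SOURCE B (Python) =====
-- def udf3(a: int) -> int:
--     # Branchless arithmetic: weight each regime's value by a 0/1 indicator.
--     # Regimes: a <= 1 -> a + 22; 2 <= a <= 19 -> 0 (term omitted); a >= 20 -> 20*a.
--     lo = int(a <= 1)
--     hi = int(a >= 20)
--     return lo * (a + 22) + hi * (20 * a)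
-- ===== Notes on version B (the rewrite author's own statement) =====
-- stated objective: alternative
-- what changed: Replaced the degenerate for-loop with if/else branches by a branchless arithmetic formula: each regime's value weighted by a 0/1 indicator and summed.
import Mathlib
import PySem

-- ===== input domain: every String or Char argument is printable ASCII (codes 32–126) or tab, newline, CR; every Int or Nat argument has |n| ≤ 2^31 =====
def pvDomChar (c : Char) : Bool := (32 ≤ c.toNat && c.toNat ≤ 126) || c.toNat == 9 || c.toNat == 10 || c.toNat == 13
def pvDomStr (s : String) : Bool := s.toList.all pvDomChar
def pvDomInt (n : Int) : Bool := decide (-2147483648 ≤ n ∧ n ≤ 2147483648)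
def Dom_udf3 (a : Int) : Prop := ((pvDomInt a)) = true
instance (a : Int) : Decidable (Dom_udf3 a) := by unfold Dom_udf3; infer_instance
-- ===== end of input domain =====

-- B replaces A's loop-and-branch control flow by a branchless indicator-weighted arithmetic formula; objective: alternative.

-- ===== PORT A =====
-- for i in range(1, a): the body returns in BOTH branches, so the loop runs at most once;
-- ported as the range-entry test (1 < a, first element i = 1) plus the body; none = range empty
def udf3Loop (a : Int) : Option Int :=
  if 1 < a then
    let i : Int := 1
    if i + a > 20 then some (20 * a) else some 0
  else none

def udf3 (a : Int) : Int :=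
  let i : Int := 22
  let m : Int := a + i
  match udf3Loop a with
  | some r => r
  | none => m

-- ===== PORT B =====
def udf3_alt (a : Int) : Int :=
  let lo : Int := if a ≤ 1 then 1 else 0
  let hi : Int := if a ≥ 20 then 1 else 0
  lo * (a + 22) + hi * (20 * a)

-- ===== PRECONDITION & SPEC =====
def Spec_udf3 (a : Int) (out : Int) : Prop := out = udf3_alt a
instance (a : Int) (out : Int) : Decidable (Spec_udf3 a out) := by unfold Spec_udf3; infer_instance

-- ===== CLAIM =====
def Claim_equal_udf3 : Prop := ∀ (a : Int), Dom_udf3 a → Spec_udf3 a (udf3 a)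

-- ===== LEMMAS AND PROOFS =====

-- ===== VERDICT =====
theorem udf3_spec : Claim_equal_udf3 := by
  intro a _
  unfold Spec_udf3 udf3 udf3_alt udf3Loop
  by_cases h1 : (1:Int) < a
  · by_cases h2 : (20:Int) < (1:Int) + a
    · simp only [if_pos h1, if_pos h2,
        if_neg (by omega : ¬ a ≤ 1), if_pos (by omega : a ≥ 20)]
      ring
    · simp only [if_pos h1, if_neg h2,
        if_neg (by omega : ¬ a ≤ 1), if_neg (by omega : ¬ a ≥ 20)]
      ring
  · simp only [if_neg h1, if_pos (by omega : a ≤ 1),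
      if_neg (by omega : ¬ a ≥ 20)]
    ring
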